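-- pv_equiv track=rewrite | github.com/TeamOfWeekend/py_algorithm | myapp/algo_string.py | get_rolling_str
-- ===== SOURCE A (Python) =====
-- def get_rolling_str(str):
--     '''获取字符串中的回文，如abcab中包含的回文：abca、bcab，即首末字符相同'''
--     str_list = []
--
--     for i in range(len(str)):
--         str_new = ''
--         str_new += str[i]
--         for j in range(i+1, len(str)):
--             str_new += str[j]
--             if str_new[0] == str[j]:
--                 str_list.append(str_new)
--                 break
--
--     return str_list
-- ===== SOURCE B (Python) =====
-- def get_rolling_str(str):
--     '''One right-to-left pass records each char's nearest next occurrence; then slice.'''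
--     last = {}
--     nexts = []
--     for i in reversed(range(len(str))):
--         nexts.append(last.get(str[i]))
--         last[str[i]] = i
--     nexts.reverse()
--     out = []
--     for i, j in enumerate(nexts):
--         if j is not None:
--             out.append(str[i:j + 1])
--     return out
-- ===== Notes on version B (the rewrite author's own statement) =====
-- stated objective: faster
-- what changed: Replaces A's per-index forward character-by-character scan (quadratic) with one right-to-left pass that records, via a dict of last-seen positions, each index's nearest next occurrence of the same character, then emits the slices.
import Mathlib
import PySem

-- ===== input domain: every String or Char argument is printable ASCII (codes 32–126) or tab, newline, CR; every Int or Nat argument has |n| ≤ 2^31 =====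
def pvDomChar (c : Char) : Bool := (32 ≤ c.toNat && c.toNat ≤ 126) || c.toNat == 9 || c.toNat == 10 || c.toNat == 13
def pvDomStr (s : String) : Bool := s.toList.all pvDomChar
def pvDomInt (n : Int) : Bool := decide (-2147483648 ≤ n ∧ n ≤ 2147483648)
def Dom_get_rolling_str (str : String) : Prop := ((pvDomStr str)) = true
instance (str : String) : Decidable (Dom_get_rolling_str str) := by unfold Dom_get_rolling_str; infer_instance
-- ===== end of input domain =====

-- B replaces A's per-index forward scan by one right-to-left pass that records each index's nearest
-- next occurrence of the same character in a dict, then slices (objective: faster).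

-- ===== PORT A =====
-- inner 'for j in range(i+1, len(str))' loop: appends str[j] to str_new, break (= some) on first match
def aInner (s : List Char) (strNew : List Char) : List Nat → Option (List Char)
  | [] => none
  | j :: rest =>
    let strNew' := strNew ++ [s.getD j ' ']   -- str[j]: j is always in range here
    if strNew'.headD ' ' == s.getD j ' ' then some strNew' else aInner s strNew' rest

def get_rolling_str (str : String) : List String :=
  let s := str.toList
  (List.range s.length).foldl
    (fun acc i =>
      match aInner s ([] ++ [s.getD i ' ']) (List.range' (i + 1) (s.length - (i + 1))) with
      | some v => acc ++ [String.ofList v]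
      | none => acc) []

-- ===== PORT B =====
def get_rolling_str_alt (str : String) : List String :=
  let s := str.toList
  -- for i in reversed(range(len(str))): nexts.append(last.get(str[i])); last[str[i]] = i
  let res := (List.range s.length).reverse.foldl
    (fun (acc : List (Option Nat) × PySem.Dict Char Nat) i =>
      (acc.1 ++ [acc.2.get? (s.getD i ' ')], acc.2.insert (s.getD i ' ') i))
    ([], PySem.Dict.empty)
  let nexts := res.1.reverse
  -- for i, j in enumerate(nexts): if j is not None: out.append(str[i:j+1])
  (PySem.List.enumerate nexts).foldl
    (fun out p =>
      match p.2 with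
      | some j => out ++ [String.ofList (PySem.List.slice s (some p.1) (some ((j : Int) + 1)))]
      | none => out) []

-- ===== PRECONDITION & SPEC =====
def Spec_get_rolling_str (str : String) (out : List String) : Prop := out = get_rolling_str_alt str
instance (str : String) (out : List String) : Decidable (Spec_get_rolling_str str out) := by unfold Spec_get_rolling_str; infer_instance

-- ===== CLAIM (what is proved, stated in full; the proofs are below) =====
def Claim_equal_get_rolling_str : Prop := ∀ (str : String), Dom_get_rolling_str str → Spec_get_rolling_str str (get_rolling_str str)

-- ===== LEMMAS AND PROOFS =====

-- the nearest next index with the same character (common characterisation of both ports)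
def nxtF (s : List Char) (i : Nat) : Option Nat :=
  (List.range' (i + 1) (s.length - (i + 1))).find? (fun j => s.getD j ' ' == s.getD i ' ')

lemma foldl_filterMap {α γ β : Type} (f : α → Option γ) (g : α → γ → β)
    (step : List β → α → List β)
    (hstep : ∀ (a : List β) (x : α), step a x = match f x with | some v => a ++ [g x v] | none => a)
    (l : List α) (acc : List β) :
    l.foldl step acc = acc ++ l.filterMap (fun x => (f x).map (g x)) := by
  induction l generalizing acc with
  | nil => simp
  | cons x xs ih =>
    rw [List.foldl_cons, hstep, ih]
    rcases h : f x with _ | v <;> simp [h]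

lemma aInner_eq (s : List Char) :
    ∀ (len start : Nat) (c : Char) (t : List Char),
      aInner s (c :: t) (List.range' start len)
        = ((List.range' start len).find? (fun j => s.getD j ' ' == c)).map
            (fun j => (c :: t) ++ (List.range' start (j + 1 - start)).map (fun u => s.getD u ' ')) := by
  intro len
  induction len with
  | zero => intro start c t; simp [aInner]
  | succ m ih =>
    intro start c t
    rw [List.range'_succ]
    by_cases h : s[start]?.getD ' ' = c
    · simp [aInner, List.getD_eq_getElem?_getD, h, List.range'_succ]
    · have hb : (s[start]?.getD ' ' == c) = false := by simp [h]
      have hb' : (c == s[start]?.getD ' ') = false := by simp [Ne.symm h]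
      simp only [aInner, List.getD_eq_getElem?_getD, List.cons_append, List.headD_cons, hb',
        List.find?_cons, hb]
      have := ih (start + 1) c (t ++ [s.getD start ' '])
      simp only [List.getD_eq_getElem?_getD, List.cons_append] at this
      rw [this]
      rcases hf : (List.range' (start + 1) m).find? (fun j => s[j]?.getD ' ' == c) with _ | j
      · simp
      · have hmem := List.mem_of_find?_eq_some hf
        have hj : start + 1 ≤ j := (List.mem_range'_1.mp hmem).1
        have e1 : j + 1 - start = (j - start) + 1 := by omega
        have e2 : j + 1 - (start + 1) = j - start := by omega
        simp only [Option.map_some, e1, e2, List.range'_succ, List.map_cons]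
        simp

lemma dropTake_eq_map_range' (s : List Char) :
    ∀ (m a : Nat), a + m ≤ s.length →
      (s.drop a).take m = (List.range' a m).map (fun u => s.getD u ' ') := by
  intro m
  induction m with
  | zero => simp
  | succ k ih =>
    intro a ha
    have hlt : a < s.length := by omega
    rw [List.drop_eq_getElem_cons hlt, List.range'_succ]
    simp only [List.take_succ_cons, List.map_cons]
    rw [ih (a + 1) (by omega)]
    simp [List.getD_eq_getElem?_getD, hlt]

lemma bFold_eq (s : List Char) :
    ∀ (k : Nat), k ≤ s.length → ∀ (acc : List (Option Nat)) (d : PySem.Dict Char Nat),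
      (∀ c, d.get? c = (List.range' k (s.length - k)).find? (fun j => s.getD j ' ' == c)) →
      (((List.range k).reverse.foldl
          (fun (acc : List (Option Nat) × PySem.Dict Char Nat) i =>
            (acc.1 ++ [acc.2.get? (s.getD i ' ')], acc.2.insert (s.getD i ' ') i))
          (acc, d)).1)
        = acc ++ ((List.range k).map (nxtF s)).reverse := by
  intro k
  induction k with
  | zero => intro _ acc d _; simp
  | succ k ih =>
    intro hk acc d hd
    rw [List.range_succ, List.reverse_append]
    simp only [List.reverse_cons, List.reverse_nil, List.nil_append, List.cons_append,
      List.foldl_cons, List.map_append, List.map_cons, List.map_nil, List.reverse_append]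
    have hget : d.get? (s.getD k ' ') = nxtF s k := by
      have := hd (s.getD k ' ')
      rwa [nxtF]
    have hd' : ∀ c, (d.insert (s.getD k ' ') k).get? c
        = (List.range' k (s.length - k)).find? (fun j => s.getD j ' ' == c) := by
      intro c
      have e : s.length - k = (s.length - (k + 1)) + 1 := by omega
      rw [e, List.range'_succ, List.find?_cons]
      rw [PySem.Dict.get?_insert]
      simp only [List.getD_eq_getElem?_getD]
      by_cases hc : c = s[k]?.getD ' '
      · simp [hc]
      · have hb : (s[k]?.getD ' ' == c) = false := by simp [Ne.symm hc]
        have := hd c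
        simp only [List.getD_eq_getElem?_getD] at this
        simp [hc, hb, this]
    rw [ih (by omega) (acc ++ [d.get? (s.getD k ' ')]) _ hd', hget]
    simp

lemma enumerate_map_range {α : Type} (f : Nat → α) (n : Nat) :
    PySem.List.enumerate ((List.range n).map f) 0
      = (List.range n).map (fun i : Nat => (((i : Nat) : Int), f i)) := by
  apply List.ext_getElem
  · simp [PySem.List.length_enumerate]
  · intro k h1 h2
    rw [PySem.List.getElem_enumerate]
    simp

-- the main list-level theorem: A's fold equals B's two passes
lemma main_eq (s : List Char) :
    (List.range s.length).foldl
      (fun acc i =>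
        match aInner s ([] ++ [s.getD i ' ']) (List.range' (i + 1) (s.length - (i + 1))) with
        | some v => acc ++ [String.ofList v]
        | none => acc) []
      = (PySem.List.enumerate
          ((((List.range s.length).reverse.foldl
              (fun (acc : List (Option Nat) × PySem.Dict Char Nat) i =>
                (acc.1 ++ [acc.2.get? (s.getD i ' ')], acc.2.insert (s.getD i ' ') i))
              ([], PySem.Dict.empty)).1).reverse)).foldl
          (fun out p =>
            match p.2 with
            | some j => out ++ [String.ofList (PySem.List.slice s (some p.1) (some ((j : Int) + 1)))]
            | none => out) [] := by
  have hB1 : (((List.range s.length).reverse.foldl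
      (fun (acc : List (Option Nat) × PySem.Dict Char Nat) i =>
        (acc.1 ++ [acc.2.get? (s.getD i ' ')], acc.2.insert (s.getD i ' ') i))
      ([], PySem.Dict.empty)).1) = ((List.range s.length).map (nxtF s)).reverse := by
    rw [bFold_eq s s.length le_rfl [] PySem.Dict.empty (by intro c; simp)]
    simp
  rw [hB1, List.reverse_reverse, enumerate_map_range, List.foldl_map]
  simp only []
  have h1 : (List.range s.length).foldl
      (fun acc i =>
        match aInner s ([] ++ [s.getD i ' ']) (List.range' (i + 1) (s.length - (i + 1))) with
        | some v => acc ++ [String.ofList v]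
        | none => acc) []
      = [] ++ (List.range s.length).filterMap
          (fun i => (aInner s ([] ++ [s.getD i ' ']) (List.range' (i + 1) (s.length - (i + 1)))).map
            (fun v => String.ofList v)) := by
    apply foldl_filterMap
    intro a x
    rcases aInner s ([] ++ [s.getD x ' ']) (List.range' (x + 1) (s.length - (x + 1)))
      with _ | v <;> rfl
  have h2 : (List.range s.length).foldl
      (fun out i =>
        match nxtF s i with
        | some j => out ++ [String.ofList (PySem.List.slice s (some ((i : Nat) : Int)) (some ((j : Int) + 1)))]
        | none => out) []
      = [] ++ (List.range s.length).filterMap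
          (fun i => (nxtF s i).map
            (fun j => String.ofList (PySem.List.slice s (some ((i : Nat) : Int)) (some ((j : Int) + 1))))) := by
    apply foldl_filterMap
    intro a x
    rcases nxtF s x with _ | j <;> rfl
  rw [h1, h2]
  simp only [List.nil_append]
  apply List.filterMap_congr
  intro i hi
  have hin : i < s.length := List.mem_range.mp hi
  have hA := aInner_eq s (s.length - (i + 1)) (i + 1) (s.getD i ' ') []
  rw [show (s.getD i ' ' :: []) = [s.getD i ' '] from rfl] at hA
  rw [hA]
  rcases hf : (List.range' (i + 1) (s.length - (i + 1))).find?
      (fun j => s.getD j ' ' == s.getD i ' ') with _ | j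
  · rw [show nxtF s i = none from hf]
    rfl
  · have hmem := List.mem_of_find?_eq_some hf
    have hj1 : i + 1 ≤ j := (List.mem_range'_1.mp hmem).1
    have hj2 : j < s.length := by
      have := (List.mem_range'_1.mp hmem).2
      omega
    rw [show nxtF s i = some j from hf]
    simp only [Option.map_some]
    congr 1
    beta_reduce
    have hcast : ((j : Int) + 1) = (((j + 1 : Nat) : Nat) : Int) := by push_cast; ring
    rw [hcast, PySem.List.slice_natCast]
    rw [dropTake_eq_map_range' s (j + 1 - i) i (by omega)]
    have e1 : j + 1 - i = (j - i) + 1 := by omega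
    have e2 : j + 1 - (i + 1) = j - i := by omega
    rw [e1, e2, List.range'_succ]
    simp

-- ===== VERDICT (by name: the statement is the Claim_ definition above) =====
theorem get_rolling_str_spec : Claim_equal_get_rolling_str := by
  intro str _
  unfold Spec_get_rolling_str get_rolling_str get_rolling_str_alt
  exact main_eq str.toList
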